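-- pv_equiv track=rewrite | github.com/toggle1995/RIS-DMMI | data/dataset_zom.py | insert_evenly
-- ===== SOURCE A (Python) =====
-- def insert_evenly(list_a, list_b):
--     len_a = len(list_a)
--     len_b = len(list_b)
--     block_size = len_b // len_a
--
--     result = []
--     for i in range(len_a):
--         start = i * block_size
--         end = (i + 1) * block_size
--         result.extend(list_b[start:end])
--         result.append(list_a[i])
--
--     remaining = list_b[(len_a * block_size):]
--     result.extend(remaining)
--
--     return result
-- ===== SOURCE B (Python) =====
-- def insert_evenly(list_a, list_b):
--     block_size = len(list_b) // len(list_a)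
--     result = list(list_b)
--     for i in range(len(list_a)):
--         result.insert((i + 1) * block_size + i, list_a[i])
--     return result
-- ===== Notes on version B (the rewrite author's own statement) =====
-- stated objective: alternative
-- what changed: B builds the result by inserting each list_a element at its computed position (i+1)*block_size+i into a copy of list_b, instead of A's sequential concatenation of block slices of list_b interleaved with list_a elements.
import Mathlib
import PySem

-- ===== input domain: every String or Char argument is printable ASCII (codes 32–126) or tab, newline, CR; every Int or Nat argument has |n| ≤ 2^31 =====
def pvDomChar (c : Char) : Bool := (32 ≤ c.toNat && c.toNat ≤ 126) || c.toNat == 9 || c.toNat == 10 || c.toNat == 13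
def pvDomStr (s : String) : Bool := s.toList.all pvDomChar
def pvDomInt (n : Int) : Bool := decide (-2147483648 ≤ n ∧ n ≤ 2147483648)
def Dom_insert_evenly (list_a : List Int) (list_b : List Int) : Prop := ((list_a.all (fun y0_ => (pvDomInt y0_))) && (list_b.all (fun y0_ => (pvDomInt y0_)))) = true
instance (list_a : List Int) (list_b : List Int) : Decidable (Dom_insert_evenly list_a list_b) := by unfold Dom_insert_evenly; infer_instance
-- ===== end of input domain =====

-- B builds the result by positional insertions into a copy of list_b instead of
-- concatenating block slices; objective: alternative decomposition (not faster:
-- each insert shifts a suffix, so B costs more on large inputs).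
-- Neither version mutates its arguments (B copies list_b before inserting).

-- ===== PORT A =====
def insert_evenly (list_a : List Int) (list_b : List Int) : List Int :=
  let len_a : Int := list_a.length
  let len_b : Int := list_b.length
  let block_size : Int := PySem.Int.floordiv len_b len_a
  let result : List Int :=
    (PySem.List.pyRange 0 len_a 1).foldl
      (fun result i =>
        (result ++ PySem.List.slice list_b (some (i * block_size)) (some ((i + 1) * block_size)))
          ++ [PySem.List.pyGetD list_a i 0])
      []
  let remaining := PySem.List.slice list_b (some (len_a * block_size)) none
  result ++ remaining

-- ===== PORT B =====
def insert_evenly_alt (list_a : List Int) (list_b : List Int) : List Int :=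
  let block_size : Int := PySem.Int.floordiv (list_b.length : Int) (list_a.length : Int)
  (PySem.List.pyRange 0 (list_a.length : Int) 1).foldl
    (fun result i =>
      PySem.List.insert result ((i + 1) * block_size + i) (PySem.List.pyGetD list_a i 0))
    list_b

-- ===== PRECONDITION & SPEC =====
-- Pre_ excludes only list_a = [], where Python's '//' raises ZeroDivisionError.
def Pre_insert_evenly (list_a : List Int) (_list_b : List Int) : Prop := list_a ≠ []
instance (list_a : List Int) (list_b : List Int) : Decidable (Pre_insert_evenly list_a list_b) := by unfold Pre_insert_evenly; infer_instance
def pvWitness_insert_evenly : List Int × List Int := ([1, 2], [10, 20, 30, 40, 50])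

def Spec_insert_evenly (list_a : List Int) (list_b : List Int) (out : List Int) : Prop := out = insert_evenly_alt list_a list_b
instance (list_a : List Int) (list_b : List Int) (out : List Int) : Decidable (Spec_insert_evenly list_a list_b out) := by unfold Spec_insert_evenly; infer_instance

-- ===== CLAIM (what is proved, stated in full; the proofs are below) =====
def Claim_equal_insert_evenly : Prop := ∀ (list_a : List Int) (list_b : List Int), Dom_insert_evenly list_a list_b → Pre_insert_evenly list_a list_b → Spec_insert_evenly list_a list_b (insert_evenly list_a list_b)

-- ===== LEMMAS AND PROOFS =====

-- A's partial result after k loop iterations (block slices rewritten to drop/take).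
def pvPrefix (a b : List Int) (bs k : Nat) : List Int :=
  (List.range k).foldl (fun r j => (r ++ (b.drop (j * bs)).take bs) ++ [a.getD j 0]) []

lemma pvPrefix_succ (a b : List Int) (bs k : Nat) :
    pvPrefix a b bs (k + 1)
      = (pvPrefix a b bs k ++ (b.drop (k * bs)).take bs) ++ [a.getD k 0] := by
  simp [pvPrefix, List.range_succ]

lemma pvPrefix_length (a b : List Int) (bs k : Nat) (hk : k * bs ≤ b.length) :
    (pvPrefix a b bs k).length = k * bs + k := by
  induction k with
  | zero => simp [pvPrefix]
  | succ k ih =>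
    have hsucc : (k + 1) * bs = k * bs + bs := by ring
    rw [hsucc] at hk
    rw [pvPrefix_succ]
    simp [ih (by omega), List.length_take, List.length_drop]
    omega

-- Invariant: after k insertions B's accumulator is A's k-prefix followed by the
-- not-yet-consumed tail of b.
lemma pv_invariant (a b : List Int) (bs k : Nat) (hk : k * bs ≤ b.length) :
    (List.range k).foldl
        (fun (r : List Int) (j : Nat) => PySem.List.insert r (((j : Int) + 1) * (bs : Int) + (j : Int)) (a.getD j 0)) b
      = pvPrefix a b bs k ++ b.drop (k * bs) := by
  induction k with
  | zero => simp [pvPrefix]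
  | succ k ih =>
    have hsucc : (k + 1) * bs = k * bs + bs := by ring
    rw [hsucc] at hk
    have hk' : k * bs ≤ b.length := by omega
    rw [List.range_succ, List.foldl_append, ih hk']
    simp only [List.foldl_cons, List.foldl_nil]
    have hpos : ((k : Int) + 1) * (bs : Int) + (k : Int) = (((k + 1) * bs + k : Nat) : Int) := by
      push_cast; ring
    have hlenP := pvPrefix_length a b bs k hk'
    have hle : (k + 1) * bs + k ≤ (pvPrefix a b bs k ++ b.drop (k * bs)).length := by
      rw [List.length_append, hlenP, List.length_drop, hsucc]
      omega
    rw [hpos, PySem.List.insert_natCast _ _ _ hle]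
    have hsplit : (k + 1) * bs + k = (pvPrefix a b bs k).length + bs := by omega
    rw [hsplit, List.take_append, List.drop_append, pvPrefix_succ]
    rw [List.take_of_length_le (l := pvPrefix a b bs k) (by omega),
        List.drop_eq_nil_of_le (as := pvPrefix a b bs k) (by omega)]
    simp only [Nat.add_sub_cancel_left, List.nil_append, List.append_assoc, List.cons_append,
      List.drop_drop, hsucc]

theorem pv_main (list_a list_b : List Int) (_h : list_a ≠ []) :
    insert_evenly list_a list_b = insert_evenly_alt list_a list_b := by
  simp only [insert_evenly, insert_evenly_alt]
  set la : Nat := list_a.length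
  set bs : Nat := list_b.length / la with hbs
  have hfd : PySem.Int.floordiv (list_b.length : Int) (la : Int) = (bs : Int) := by
    exact_mod_cast PySem.Int.floordiv_natCast list_b.length la
  have hla : la * bs ≤ list_b.length := by
    rw [hbs, Nat.mul_comm]; exact Nat.div_mul_le_self _ _
  clear_value la bs
  rw [hfd, PySem.List.pyRange_zero_natCast, List.foldl_map, List.foldl_map]
  have hA : (fun (r : List Int) (j : Nat) =>
        (r ++ PySem.List.slice list_b (some ((j : Int) * (bs : Int)))
            (some (((j : Int) + 1) * (bs : Int)))) ++ [PySem.List.pyGetD list_a (j : Int) 0])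
      = fun r j => (r ++ (list_b.drop (j * bs)).take bs) ++ [list_a.getD j 0] := by
    funext r j
    have h1 : (j : Int) * (bs : Int) = ((j * bs : Nat) : Int) := by push_cast; ring
    have h2 : ((j : Int) + 1) * (bs : Int) = (((j + 1) * bs : Nat) : Int) := by push_cast; ring
    rw [h1, h2, PySem.List.slice_natCast]
    have h3 : (j + 1) * bs - j * bs = bs := by
      have h5 : (j + 1) * bs = j * bs + bs := by ring
      rw [h5]
      omega
    simp [h3]
  have hB : (fun (r : List Int) (j : Nat) =>
        PySem.List.insert r (((j : Int) + 1) * (bs : Int) + (j : Int)) (PySem.List.pyGetD list_a (j : Int) 0))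
      = fun (r : List Int) (j : Nat) => PySem.List.insert r (((j : Int) + 1) * (bs : Int) + (j : Int)) (list_a.getD j 0) := by
    funext r j; simp
  rw [hA, hB, pv_invariant list_a list_b bs la hla]
  have h4 : (la : Int) * (bs : Int) = ((la * bs : Nat) : Int) := by push_cast; ring
  rw [h4, PySem.List.slice_from_natCast]
  rfl

-- ===== VERDICT (by name: the statement is the Claim_ definition above) =====
theorem insert_evenly_spec : Claim_equal_insert_evenly := by
  intro list_a list_b _ hpre
  unfold Spec_insert_evenly
  exact pv_main list_a list_b hpre
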